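-- pv_equiv track=rewrite | github.com/DyogenIBENS/Phylorgs | dendro/dollocorr.py | ordered_nonnull_integer_n_partition
-- ===== SOURCE A (Python) =====
-- def ordered_nonnull_integer_n_partition(total:int, nterms:int , minval=1):
--     """Iterate over all possibilities.
--     Each terms of the summation is ordered."""
--     if nterms <= 0:
--     #    yield ()
--         raise StopIteration
--
--     if nterms == 1:
--         yield (total,)
--     else:
--         for i in range(minval, total//nterms + 1):
--             for next_terms in ordered_nonnull_integer_n_partition(total-i, nterms-1, i):
--                 yield (i,) + next_terms
-- ===== SOURCE B (Python) =====
-- def ordered_nonnull_integer_n_partition(total: int, nterms: int, minval=1):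
--     """Level-by-level expansion: keep a list of partial states
--     (remaining_total, current_min, prefix) and expand one term per round."""
--     if nterms < 1:
--         return []
--     remaining = nterms
--     states = [(total, minval, ())]
--     while remaining > 1 and states:
--         states = [(t - i, i, pre + (i,))
--                   for (t, mv, pre) in states
--                   for i in range(mv, t // remaining + 1)]
--         remaining -= 1
--     return [pre + (t,) for (t, mv, pre) in states]
-- ===== Notes on version B (the rewrite author's own statement) =====
-- stated objective: alternative
-- what changed: Replaces A's depth-first recursive generator by an iterative level-by-level expansion: a list of partial states (remaining_total, current_min, prefix) is expanded one summation term per round, which preserves the lexicographic yield order; B returns a list instead of a generator.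
import Mathlib
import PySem

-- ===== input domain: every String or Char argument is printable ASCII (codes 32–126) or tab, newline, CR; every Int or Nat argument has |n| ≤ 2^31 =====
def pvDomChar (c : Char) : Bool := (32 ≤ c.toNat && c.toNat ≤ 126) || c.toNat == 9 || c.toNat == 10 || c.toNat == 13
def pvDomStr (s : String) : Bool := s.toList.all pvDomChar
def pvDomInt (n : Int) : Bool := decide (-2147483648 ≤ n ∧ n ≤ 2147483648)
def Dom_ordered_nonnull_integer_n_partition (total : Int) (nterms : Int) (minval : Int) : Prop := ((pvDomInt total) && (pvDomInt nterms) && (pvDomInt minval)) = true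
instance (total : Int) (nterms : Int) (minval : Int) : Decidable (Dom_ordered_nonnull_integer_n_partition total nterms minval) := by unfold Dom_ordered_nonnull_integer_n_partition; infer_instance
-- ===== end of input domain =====

-- B replaces A's depth-first recursive generator by an iterative level-by-level
-- expansion of partial states (same values, same order); A is a generator and B
-- returns a list of the same tuples in the same order (return-value equivalence).


-- ===== PORT A =====
-- A raises (StopIteration → RuntimeError) for nterms ≤ 0; that branch is outside
-- Pre_ and the port returns [] there (never reached by the inner recursion).
def ordered_nonnull_integer_n_partition (total : Int) (nterms : Int) (minval : Int) : List (List Int) :=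
  if nterms ≤ 0 then []
  else if nterms = 1 then [[total]]
  else
    (PySem.List.pyRange minval (PySem.Int.floordiv total nterms + 1) 1).flatMap
      (fun i =>
        (ordered_nonnull_integer_n_partition (total - i) (nterms - 1) i).map
          (fun next_terms => i :: next_terms))
termination_by nterms.toNat
decreasing_by omega

-- ===== PORT B =====
-- B's while loop: expand every state by one more term, `remaining` counts down.
def pvAltLoop (remaining : Int) (states : List (Int × Int × List Int)) : List (Int × Int × List Int) :=
  if remaining > 1 ∧ states ≠ [] then
    pvAltLoop (remaining - 1)
      (states.flatMap (fun s =>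
        (PySem.List.pyRange s.2.1 (PySem.Int.floordiv s.1 remaining + 1) 1).map
          (fun i => (s.1 - i, i, s.2.2 ++ [i]))))
  else states
termination_by remaining.toNat
decreasing_by omega

def ordered_nonnull_integer_n_partition_alt (total : Int) (nterms : Int) (minval : Int) : List (List Int) :=
  if nterms < 1 then []
  else (pvAltLoop nterms [(total, minval, [])]).map (fun s => s.2.2 ++ [s.1])

-- ===== PRECONDITION & SPEC =====
-- Pre_ excludes exactly nterms ≤ 0, where iterating A's generator raises RuntimeError
-- (its 'raise StopIteration' surfaces as RuntimeError); B returns [] there.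
def Pre_ordered_nonnull_integer_n_partition (total : Int) (nterms : Int) (minval : Int) : Prop := 1 ≤ nterms
instance (total : Int) (nterms : Int) (minval : Int) : Decidable (Pre_ordered_nonnull_integer_n_partition total nterms minval) := by unfold Pre_ordered_nonnull_integer_n_partition; infer_instance
def pvWitness_ordered_nonnull_integer_n_partition : Int × Int × Int := (6, 3, 1)

def Spec_ordered_nonnull_integer_n_partition (total : Int) (nterms : Int) (minval : Int) (out : List (List Int)) : Prop := out = ordered_nonnull_integer_n_partition_alt total nterms minval
instance (total : Int) (nterms : Int) (minval : Int) (out : List (List Int)) : Decidable (Spec_ordered_nonnull_integer_n_partition total nterms minval out) := by unfold Spec_ordered_nonnull_integer_n_partition; infer_instance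

-- ===== CLAIM (what is proved, stated in full; the proofs are below) =====
def Claim_equal_ordered_nonnull_integer_n_partition : Prop := ∀ (total : Int) (nterms : Int) (minval : Int), Dom_ordered_nonnull_integer_n_partition total nterms minval → Pre_ordered_nonnull_integer_n_partition total nterms minval → Spec_ordered_nonnull_integer_n_partition total nterms minval (ordered_nonnull_integer_n_partition total nterms minval)
-- ===== LEMMAS AND PROOFS =====

-- Main invariant: running B's loop from `n ≥ 1` and then finishing the states
-- equals expanding each state with A's recursion (prefix appended in front).
theorem pvAltLoop_invariant (n : Int) (hn : 1 ≤ n) :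
    ∀ states : List (Int × Int × List Int),
      (pvAltLoop n states).map (fun s => s.2.2 ++ [s.1]) =
        states.flatMap (fun s =>
          (ordered_nonnull_integer_n_partition s.1 n s.2.1).map (fun p => s.2.2 ++ p)) := by
  induction n, hn using Int.le_induction with
  | base =>
    intro states
    rw [pvAltLoop]
    simp [ordered_nonnull_integer_n_partition, ← List.map_eq_flatMap]
  | succ n hn ih =>
    intro states
    rw [pvAltLoop]
    by_cases hs : states = []
    · subst hs; simp
    · rw [if_pos (⟨by omega, hs⟩ : n + 1 > 1 ∧ states ≠ [])]
      simp only [show n + 1 - 1 = n from by omega]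
      rw [ih, List.flatMap_assoc]
      congr 1
      funext s
      rw [ordered_nonnull_integer_n_partition]
      rw [if_neg (by omega : ¬ n + 1 ≤ 0), if_neg (by omega : ¬ n + 1 = 1)]
      simp only [show n + 1 - 1 = n by omega]
      rw [List.flatMap_map, List.map_flatMap]
      congr 1
      funext i
      rw [List.map_map]
      congr 1
      funext p
      simp

-- ===== VERDICT (by name: the statement is the Claim_ definition above) =====
theorem ordered_nonnull_integer_n_partition_spec : Claim_equal_ordered_nonnull_integer_n_partition := by
  intro total nterms minval _ hpre
  unfold Pre_ordered_nonnull_integer_n_partition at hpre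
  unfold Spec_ordered_nonnull_integer_n_partition ordered_nonnull_integer_n_partition_alt
  rw [if_neg (by omega : ¬ nterms < 1)]
  rw [pvAltLoop_invariant nterms hpre]
  simp
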